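-- pv_equiv track=rewrite | github.com/Darshu32/KATHA-AI | backend/app/knowledge/variations.py | compatible_materials
-- ===== SOURCE A (Python) =====
-- MATERIAL_SWAP_FAMILIES: dict[str, list[str]] = {
--     "solid_wood_warm": ["walnut", "teak", "rubberwood"],
--     "solid_wood_light": ["oak", "rubberwood"],
--     "panel_substrate": ["plywood_marine", "mdf"],
--     "structural_metal": ["mild_steel", "stainless_steel_304"],
--     "accent_metal": ["brass", "stainless_steel_304", "aluminium_6061"],
--     "premium_upholstery": ["leather_genuine_grade_A", "leather_genuine_grade_B", "fabric_wool_blend"],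
--     "everyday_upholstery": ["fabric_cotton", "fabric_linen", "fabric_synthetic_blend"],
--     "performance_upholstery": ["fabric_performance_poly", "fabric_synthetic_blend"],
--     "seat_foam": ["HD36", "HR40"],
-- }
--
-- def compatible_materials(material: str) -> list[str]:
--     """Return other materials in the same BRD swap family (excluding the input)."""
--     key = material.strip().lower().replace(" ", "_").replace("-", "_")
--     matches: list[str] = []
--     for family in MATERIAL_SWAP_FAMILIES.values():
--         if key in family:
--             matches.extend(m for m in family if m != key)
--     # dedupe while preserving order
--     seen: set[str] = set()
--     out: list[str] = []
--     for m in matches: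
--         if m not in seen:
--             out.append(m)
--             seen.add(m)
--     return out
-- ===== SOURCE B (Python) =====
-- MATERIAL_SWAP_FAMILIES: dict[str, list[str]] = {
--     "solid_wood_warm": ["walnut", "teak", "rubberwood"],
--     "solid_wood_light": ["oak", "rubberwood"],
--     "panel_substrate": ["plywood_marine", "mdf"],
--     "structural_metal": ["mild_steel", "stainless_steel_304"],
--     "accent_metal": ["brass", "stainless_steel_304", "aluminium_6061"],
--     "premium_upholstery": ["leather_genuine_grade_A", "leather_genuine_grade_B", "fabric_wool_blend"],
--     "everyday_upholstery": ["fabric_cotton", "fabric_linen", "fabric_synthetic_blend"],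
--     "performance_upholstery": ["fabric_performance_poly", "fabric_synthetic_blend"],
--     "seat_foam": ["HD36", "HR40"],
-- }
--
-- # Reverse index built once at module load: material -> other members of all its
-- # families, in family order, deduped while preserving order.
-- MATERIAL_TO_COMPATIBLE: dict[str, list[str]] = {}
-- for _family in MATERIAL_SWAP_FAMILIES.values():
--     for _m in _family:
--         _bucket = MATERIAL_TO_COMPATIBLE.setdefault(_m, [])
--         for _other in _family:
--             if _other != _m and _other not in _bucket:
--                 _bucket.append(_other)
--
-- def compatible_materials(material: str) -> list[str]:
--     """Return other materials in the same BRD swap family (excluding the input)."""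
--     key = material.strip().lower().replace(" ", "_").replace("-", "_")
--     return list(MATERIAL_TO_COMPATIBLE.get(key, []))
-- ===== Notes on version B (the rewrite author's own statement) =====
-- stated objective: idiomatic
-- what changed: B builds a reverse index dict (material -> other family members, deduped in family order) once at module load, so each call is a single normalized-key dict lookup instead of A's per-call scan over all swap families plus a dedupe pass.
import Mathlib
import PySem

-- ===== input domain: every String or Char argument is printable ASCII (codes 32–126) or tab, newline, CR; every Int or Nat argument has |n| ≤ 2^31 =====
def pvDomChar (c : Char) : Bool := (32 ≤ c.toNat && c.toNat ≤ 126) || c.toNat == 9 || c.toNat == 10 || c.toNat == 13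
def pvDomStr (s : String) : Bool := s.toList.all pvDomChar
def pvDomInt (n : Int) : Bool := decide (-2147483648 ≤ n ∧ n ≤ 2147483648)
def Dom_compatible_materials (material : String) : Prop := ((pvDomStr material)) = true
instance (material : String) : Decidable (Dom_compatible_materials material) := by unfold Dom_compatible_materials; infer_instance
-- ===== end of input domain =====

-- B replaces A's per-call scan over all swap families by a reverse index built once
-- at module load; per call it is a single dict lookup (objective: idiomatic/faster per call).

-- MATERIAL_SWAP_FAMILIES.values(), shared module constant of both programs
def pvFamilies : List (List String) :=
  [["walnut", "teak", "rubberwood"],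
   ["oak", "rubberwood"],
   ["plywood_marine", "mdf"],
   ["mild_steel", "stainless_steel_304"],
   ["brass", "stainless_steel_304", "aluminium_6061"],
   ["leather_genuine_grade_A", "leather_genuine_grade_B", "fabric_wool_blend"],
   ["fabric_cotton", "fabric_linen", "fabric_synthetic_blend"],
   ["fabric_performance_poly", "fabric_synthetic_blend"],
   ["HD36", "HR40"]]

-- key = material.strip().lower().replace(" ", "_").replace("-", "_")  (identical line in A and B)
def pvNormKey (material : String) : String :=
  PySem.Str.replace (PySem.Str.replace (PySem.Str.lower (PySem.Str.strip material)) " " "_") "-" "_"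

-- ===== PORT A =====
-- body of A after key is computed: scan all families, then dedupe preserving order
def pvScanLookup (key : String) : List String :=
  let ms := pvFamilies.foldl
    (fun acc family =>
      if family.contains key then acc ++ family.filter (fun m => decide (m ≠ key)) else acc)
    []
  (ms.foldl
    (fun (st : PySem.Set String × List String) m =>
      if PySem.Set.contains st.1 m then st else (PySem.Set.add st.1 m, st.2 ++ [m]))
    (PySem.Set.empty, [])).2

def compatible_materials (material : String) : List String :=
  pvScanLookup (pvNormKey material)

-- ===== PORT B =====
-- module-load loop of Source B: MATERIAL_TO_COMPATIBLE reverse index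
def pvTable : PySem.Dict String (List String) :=
  pvFamilies.foldl
    (fun d family =>
      family.foldl
        (fun d m =>
          let d1 := d.setdefault m []
          let bucket := d1.getD m []
          let bucket2 := family.foldl
            (fun b other => if decide (other ≠ m) && !(b.contains other) then b ++ [other] else b)
            bucket
          d1.insert m bucket2)
        d)
    PySem.Dict.empty

def compatible_materials_alt (material : String) : List String :=
  ((pvTable.get? (pvNormKey material)).getD [])

-- ===== PRECONDITION & SPEC =====
def Spec_compatible_materials (material : String) (out : List String) : Prop := out = compatible_materials_alt material
instance (material : String) (out : List String) : Decidable (Spec_compatible_materials material out) := by unfold Spec_compatible_materials; infer_instance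

-- ===== CLAIM (what is proved, stated in full; the proofs are below) =====
def Claim_equal_compatible_materials : Prop := ∀ (material : String), Dom_compatible_materials material → Spec_compatible_materials material (compatible_materials material)

-- ===== LEMMAS AND PROOFS =====
set_option maxRecDepth 10000 in
theorem pvTable_eq : pvTable = PySem.Dict.mk
    [("walnut", ["teak", "rubberwood"]), ("teak", ["walnut", "rubberwood"]),
     ("rubberwood", ["walnut", "teak", "oak"]), ("oak", ["rubberwood"]),
     ("plywood_marine", ["mdf"]), ("mdf", ["plywood_marine"]),
     ("mild_steel", ["stainless_steel_304"]),
     ("stainless_steel_304", ["mild_steel", "brass", "aluminium_6061"]),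
     ("brass", ["stainless_steel_304", "aluminium_6061"]),
     ("aluminium_6061", ["brass", "stainless_steel_304"]),
     ("leather_genuine_grade_A", ["leather_genuine_grade_B", "fabric_wool_blend"]),
     ("leather_genuine_grade_B", ["leather_genuine_grade_A", "fabric_wool_blend"]),
     ("fabric_wool_blend", ["leather_genuine_grade_A", "leather_genuine_grade_B"]),
     ("fabric_cotton", ["fabric_linen", "fabric_synthetic_blend"]),
     ("fabric_linen", ["fabric_cotton", "fabric_synthetic_blend"]),
     ("fabric_synthetic_blend", ["fabric_cotton", "fabric_linen", "fabric_performance_poly"]),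
     ("fabric_performance_poly", ["fabric_synthetic_blend"]),
     ("HD36", ["HR40"]), ("HR40", ["HD36"])] := by decide

set_option maxRecDepth 10000 in
theorem pvCore (key : String) : pvScanLookup key = (pvTable.get? key).getD [] := by
  by_cases h : key ∈ pvFamilies.flatten
  · simp [pvFamilies] at h
    rcases h with h | h | h | h | h | h | h | h | h | h | h | h | h | h | h | h | h | h | h | h | h | h <;>
      subst h <;> decide
  · simp [pvFamilies] at h
    obtain ⟨h1, h2, h3, h4, h5, h6, h7, h8, h9, h10, h11, h12, h13, h14, h15, h16, h17, h18, h19, h20, h21, h22⟩ := h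
    simp [pvScanLookup, pvFamilies, pvTable_eq, PySem.Dict.get?,
      h1, h2, h3, h4, h6, h7, h8, h9, h10, h12, h13, h14, h15, h16, h17, h18, h19, h21, h22,
      Ne.symm h1, Ne.symm h2, Ne.symm h3, Ne.symm h4, Ne.symm h6, Ne.symm h7, Ne.symm h8, Ne.symm h9, Ne.symm h10, Ne.symm h12, Ne.symm h13, Ne.symm h14, Ne.symm h15, Ne.symm h16, Ne.symm h17, Ne.symm h18, Ne.symm h19, Ne.symm h21, Ne.symm h22]

-- ===== VERDICT (by name: the statement is the Claim_ definition above) =====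
theorem compatible_materials_spec : Claim_equal_compatible_materials := by
  intro material _
  unfold Spec_compatible_materials compatible_materials compatible_materials_alt
  exact pvCore (pvNormKey material)
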